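-- pv_equiv track=rewrite | github.com/douglasdlewis2012/HackerRank | time_in_words.py | timeInWords
-- ===== SOURCE A (Python) =====
-- def timeInWords(h, m):
--
--     if h < 1 or h > 12 or m < 0 or m > 59:
--         raise ValueError('hours 1-12 mins 0-59 required')
--
--     hours = ['','one','two','three','four','five','six','seven','eight','nine','ten','eleven','twelve']
--     mins = hours + ['thirteen', 'fourteen', 'fifteen', 'sixteen','seventeen','eighteen','nineteen']
--     units = ['twenty','thirty','forty','fifty','sixty']
--
--     minutes_in_hour = mins + [ units[x] +' ' + hours[i-1]  for x in range(len(units)) for i in range(1,11)]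
--     minutes_in_hour = minutes_in_hour[1:60]
--     minutes_in_hour = [''] + minutes_in_hour
--
--     minutes_in_hour[15] = 'quarter'
--     minutes_in_hour[30] = 'half '
--
--     minutes_to = 'minutes_to'
--     past = 'past'
--     oclock = "o' clock"
--     first_30 = [ x + ' minutes '+past for x in minutes_in_hour[1:30] ] + [minutes_in_hour[30] + past]
--     last_30 = [x for x in reversed(minutes_in_hour[1:30])]
--     last_30 = [x + ' minutes to' for x in last_30]
--     all_number = first_30 + last_30
--     all_number[44] = 'quarter to'
--
--
--     all_number[14] = 'quarter past'
--     all_number[0] = 'one minute past'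
--     all_number[58] = 'one minute to'
--
--     t = [ hours[h] + ' '+ oclock ] + [  x  + ' '+ hours[h] for x in all_number[:30]]
--     t2 = [x  + ' '+ hours[((h+1) % 12)]  for x in all_number[30:]]
--
--     time_hour_mins = t + t2
--     return time_hour_mins[m]
-- ===== SOURCE B (Python) =====
-- HOURS = ['one','two','three','four','five','six','seven','eight','nine','ten',
--          'eleven','twelve']
-- ONES = ['','one','two','three','four','five','six','seven','eight','nine','ten',
--         'eleven','twelve','thirteen','fourteen','fifteen','sixteen','seventeen',
--         'eighteen','nineteen']
--
-- def _num(n):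
--     if n <= 19:
--         return ONES[n]
--     if n == 20:
--         return 'twenty'
--     return 'twenty ' + ONES[n - 20]
--
-- def timeInWords(h, m):
--     if h < 1 or h > 12 or m < 0 or m > 59:
--         raise ValueError('hours 1-12 mins 0-59 required')
--     hw = HOURS[h - 1]
--     nh = HOURS[h % 12]
--     if m == 0:
--         return hw + " o' clock"
--     if m == 1:
--         return 'one minute past ' + hw
--     if m == 15:
--         return 'quarter past ' + hw
--     if m == 30:
--         return 'half past ' + hw
--     if m == 45:
--         return 'quarter to ' + nh
--     if m == 59:
--         return 'one minute to ' + nh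
--     if m < 30:
--         return _num(m) + ' minutes past ' + hw
--     return _num(60 - m) + ' minutes to ' + nh
-- ===== Notes on version B (the rewrite author's own statement) =====
-- stated objective: simpler
-- what changed: B replaces A's construction of the full 60-entry phrase table (list comprehensions, slices and index patches) by a number-to-words helper and a direct branch on m that builds only the single phrase needed.
-- intended difference: On m=20 or m=40 A's table interpolates the empty hours[0] giving a double space ('twenty minutes ...'), and for h=11 with 31<=m<=59 A's hours[(h+1)%12] is '' so the phrase ends with a trailing space; B returns the single-spaced phrase and the correct next hour 'twelve', which is the intended wording. — e.g. on timeInWords(11, 45): A returns "quarter to ", B returns "quarter to twelve"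
import Mathlib
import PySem

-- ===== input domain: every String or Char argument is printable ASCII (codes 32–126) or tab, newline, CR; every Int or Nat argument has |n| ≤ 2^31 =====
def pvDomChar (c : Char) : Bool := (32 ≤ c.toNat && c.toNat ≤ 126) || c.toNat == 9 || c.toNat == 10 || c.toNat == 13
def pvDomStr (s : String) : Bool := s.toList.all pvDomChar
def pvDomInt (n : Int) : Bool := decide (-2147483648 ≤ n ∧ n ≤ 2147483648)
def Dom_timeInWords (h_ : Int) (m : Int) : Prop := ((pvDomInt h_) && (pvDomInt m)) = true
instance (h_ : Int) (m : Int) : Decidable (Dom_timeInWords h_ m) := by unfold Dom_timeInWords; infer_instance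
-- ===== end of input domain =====

-- B replaces A's construction of the full 60-entry phrase table by a direct branch that builds
-- only the one needed phrase (objective: simpler); B also fixes two table artefacts of A (see D_ below).

-- ===== PORT A =====
-- A's 13-entry hour word list (index 0 is '')
def pvAHours : List String :=
  ["", "one", "two", "three", "four", "five", "six", "seven", "eight", "nine",
   "ten", "eleven", "twelve"]

-- literal port of A: builds the 60-entry table, then indexes it.
-- the guard branch stands for A's 'raise ValueError' (excluded by Pre_); all list
-- indexings below it are in range on Pre_, so getD/pyGetD is exact there.
def timeInWords (h_ : Int) (m : Int) : String :=
  if h_ < 1 ∨ h_ > 12 ∨ m < 0 ∨ m > 59 then "" else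
  let hours := pvAHours
  let mins := hours ++ ["thirteen", "fourteen", "fifteen", "sixteen", "seventeen",
                        "eighteen", "nineteen"]
  let units := ["twenty", "thirty", "forty", "fifty", "sixty"]
  let minutes_in_hour := mins ++
    (PySem.List.pyRange 0 5 1).flatMap (fun x =>
      (PySem.List.pyRange 1 11 1).map (fun i =>
        PySem.List.pyGetD units x "" ++ " " ++ PySem.List.pyGetD hours (i - 1) ""))
  let minutes_in_hour := PySem.List.slice minutes_in_hour (some 1) (some 60)
  let minutes_in_hour := "" :: minutes_in_hour
  let minutes_in_hour := minutes_in_hour.set 15 "quarter"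
  let minutes_in_hour := minutes_in_hour.set 30 "half "
  let past := "past"
  let oclock := "o' clock"
  let first_30 :=
    (PySem.List.slice minutes_in_hour (some 1) (some 30)).map
      (fun x => x ++ " minutes " ++ past)
    ++ [PySem.List.pyGetD minutes_in_hour 30 "" ++ past]
  let last_30 := (PySem.List.slice minutes_in_hour (some 1) (some 30)).reverse
  let last_30 := last_30.map (fun x => x ++ " minutes to")
  let all_number := first_30 ++ last_30
  let all_number := all_number.set 44 "quarter to"
  let all_number := all_number.set 14 "quarter past"
  let all_number := all_number.set 0 "one minute past"
  let all_number := all_number.set 58 "one minute to"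
  let t := (PySem.List.pyGetD hours h_ "" ++ " " ++ oclock) ::
    (PySem.List.slice all_number none (some 30)).map
      (fun x => x ++ " " ++ PySem.List.pyGetD hours h_ "")
  let t2 := (PySem.List.slice all_number (some 30) none).map
      (fun x => x ++ " " ++ PySem.List.pyGetD hours (PySem.Int.mod (h_ + 1) 12) "")
  let time_hour_mins := t ++ t2
  PySem.List.pyGetD time_hour_mins m ""

-- ===== PORT B =====
def pvBHours : List String :=
  ["one", "two", "three", "four", "five", "six", "seven", "eight", "nine", "ten",
   "eleven", "twelve"]

def pvBOnes : List String :=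
  ["", "one", "two", "three", "four", "five", "six", "seven", "eight", "nine",
   "ten", "eleven", "twelve", "thirteen", "fourteen", "fifteen", "sixteen",
   "seventeen", "eighteen", "nineteen"]

-- port of Source B's _num (called only with 2 ≤ n ≤ 29, indexings in range → getD exact)
def pvBNum (n : Int) : String :=
  if n ≤ 19 then PySem.List.pyGetD pvBOnes n ""
  else if n = 20 then "twenty"
  else "twenty " ++ PySem.List.pyGetD pvBOnes (n - 20) ""

-- literal port of B (the guard branch stands for Source B's 'raise ValueError', outside Pre_)
def timeInWords_alt (h_ : Int) (m : Int) : String :=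
  if h_ < 1 ∨ h_ > 12 ∨ m < 0 ∨ m > 59 then "" else
  let hw := PySem.List.pyGetD pvBHours (h_ - 1) ""
  let nh := PySem.List.pyGetD pvBHours (PySem.Int.mod h_ 12) ""
  if m = 0 then hw ++ " o' clock"
  else if m = 1 then "one minute past " ++ hw
  else if m = 15 then "quarter past " ++ hw
  else if m = 30 then "half past " ++ hw
  else if m = 45 then "quarter to " ++ nh
  else if m = 59 then "one minute to " ++ nh
  else if m < 30 then pvBNum m ++ " minutes past " ++ hw
  else pvBNum (60 - m) ++ " minutes to " ++ nh

-- ===== PRECONDITION & SPEC =====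
-- A raises ValueError outside 1 ≤ h ≤ 12, 0 ≤ m ≤ 59; Pre_ is exactly A's guard.
def Pre_timeInWords (h_ : Int) (m : Int) : Prop :=
  1 ≤ h_ ∧ h_ ≤ 12 ∧ 0 ≤ m ∧ m ≤ 59
instance (h_ : Int) (m : Int) : Decidable (Pre_timeInWords h_ m) := by
  unfold Pre_timeInWords; infer_instance

def pvWitness_timeInWords : Int × Int := (5, 28)

-- On m = 20 and m = 40 A's table interpolates the empty hours[0] and returns a double space
-- ("twenty  minutes …"), and for h = 11, 31 ≤ m ≤ 59 A's hours[(h+1)%12] is '' so the phrase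
-- ends with a trailing space instead of "twelve"; B returns the single-spaced phrase and the
-- correct next hour "twelve", which is the intended wording.
def D_timeInWords (h_ : Int) (m : Int) : Prop :=
  m = 20 ∨ m = 40 ∨ (h_ = 11 ∧ 31 ≤ m ∧ m ≤ 59)
instance (h_ : Int) (m : Int) : Decidable (D_timeInWords h_ m) := by
  unfold D_timeInWords; infer_instance

def Spec_timeInWords (h_ : Int) (m : Int) (out : String) : Prop :=
  ¬ D_timeInWords h_ m → out = timeInWords_alt h_ m
instance (h_ : Int) (m : Int) (out : String) : Decidable (Spec_timeInWords h_ m out) := by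
  unfold Spec_timeInWords; infer_instance

def pvDiffWitness_timeInWords : Int × Int := (11, 45)
def pvDiffWitnessOut_timeInWords : String × String := ("quarter to ", "quarter to twelve")

-- ===== CLAIM (what is proved, stated in full; the proofs are below) =====
def Claim_unchanged_timeInWords : Prop := ∀ (h_ : Int) (m : Int), Dom_timeInWords h_ m → Pre_timeInWords h_ m → Spec_timeInWords h_ m (timeInWords h_ m)
def Claim_changed_timeInWords : Prop := Dom_timeInWords (pvDiffWitness_timeInWords.1) (pvDiffWitness_timeInWords.2) ∧ Pre_timeInWords (pvDiffWitness_timeInWords.1) (pvDiffWitness_timeInWords.2) ∧ D_timeInWords (pvDiffWitness_timeInWords.1) (pvDiffWitness_timeInWords.2) ∧ timeInWords (pvDiffWitness_timeInWords.1) (pvDiffWitness_timeInWords.2) = pvDiffWitnessOut_timeInWords.1 ∧ timeInWords_alt (pvDiffWitness_timeInWords.1) (pvDiffWitness_timeInWords.2) = pvDiffWitnessOut_timeInWords.2 ∧ pvDiffWitnessOut_timeInWords.1 ≠ pvDiffWitnessOut_timeInWords.2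
def Claim_exact_timeInWords : Prop := ∀ (h_ : Int) (m : Int), Dom_timeInWords h_ m → Pre_timeInWords h_ m → D_timeInWords h_ m → timeInWords h_ m ≠ timeInWords_alt h_ m

-- ===== LEMMAS AND PROOFS =====

-- finite check: for every (h, m) with 1 ≤ h ≤ 12, 0 ≤ m ≤ 59, either both ports agree
-- or (h, m) lies in D_ and they disagree
theorem pvTable_check :
    ((List.range 12).all (fun hn => (List.range 60).all (fun mn =>
      let h : Int := (hn : Int) + 1
      let m : Int := (mn : Int)
      if D_timeInWords h m then timeInWords h m != timeInWords_alt h m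
      else timeInWords h m == timeInWords_alt h m))) = true := by decide

theorem pvBound (h_ m : Int) (hp : Pre_timeInWords h_ m) :
    ∃ hn mn : Nat, hn < 12 ∧ mn < 60 ∧ h_ = (hn : Int) + 1 ∧ m = (mn : Int) := by
  obtain ⟨h1, h2, h3, h4⟩ := hp
  refine ⟨(h_ - 1).toNat, m.toNat, ?_, ?_, ?_, ?_⟩ <;> omega

theorem pvAgree (h_ m : Int) (hp : Pre_timeInWords h_ m) :
    (if D_timeInWords h_ m then timeInWords h_ m != timeInWords_alt h_ m
     else timeInWords h_ m == timeInWords_alt h_ m) = true := by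
  obtain ⟨hn, mn, hlt, mlt, heq, meq⟩ := pvBound h_ m hp
  subst heq meq
  have := pvTable_check
  rw [List.all_eq_true] at this
  have h1 := this hn (by simpa using hlt)
  rw [List.all_eq_true] at h1
  exact h1 mn (by simpa using mlt)

-- ===== VERDICT (by name: the statement is the Claim_ definition above) =====
theorem timeInWords_spec : Claim_unchanged_timeInWords := by
  intro h_ m _ hp hnd
  have := pvAgree h_ m hp
  rw [if_neg hnd] at this
  exact eq_of_beq this

theorem timeInWords_changed : Claim_changed_timeInWords := by
  unfold Claim_changed_timeInWords; decide

theorem timeInWords_tight : Claim_exact_timeInWords := by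
  intro h_ m _ hp hd
  have := pvAgree h_ m hp
  rw [if_pos hd] at this
  simpa using this
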